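-- pv_equiv track=rewrite | github.com/jose20d/TFM | scripts/load_to_db.py | _dedupe_countries
-- ===== SOURCE A (Python) =====
-- from typing import Any, Iterable
--
-- def _dedupe_countries(
--     rows: Iterable[tuple[str, str, str | None]]
-- ) -> list[tuple[str, str, str | None]]:
--     """Deduplicate country rows, preferring ISO3 when available."""
--     unique: dict[str, tuple[str, str, str | None]] = {}
--     for name, norm, iso3 in rows:
--         if not norm:
--             continue
--         if norm not in unique:
--             unique[norm] = (name, norm, iso3)
--             continue
--         # Prefer an ISO3 if we see one later.
--         if unique[norm][2] is None and iso3: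
--             unique[norm] = (name, norm, iso3)
--     return list(unique.values())
-- ===== SOURCE B (Python) =====
-- def _dedupe_countries(rows):
--     """Deduplicate country rows, preferring ISO3 when available."""
--     groups = {}
--     for row in rows:
--         norm = row[1]
--         if not norm:
--             continue
--         groups.setdefault(norm, []).append(row)
--     result = []
--     for grp in groups.values():
--         chosen = grp[0]
--         if chosen[2] is None:
--             for cand in grp[1:]:
--                 if cand[2]:
--                     chosen = cand
--                     break
--         result.append(chosen)
--     return result
-- ===== Notes on version B (the rewrite author's own statement) =====
-- stated objective: alternative
-- what changed: B first groups all rows by their norm key into per-key lists (one dict-building pass), then selects each group's representative in a separate loop (the first row, upgraded to the first later row with a truthy iso3 only when the first row's iso3 is None), instead of A's single pass that upgrades the stored tuple inline.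
import Mathlib
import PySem

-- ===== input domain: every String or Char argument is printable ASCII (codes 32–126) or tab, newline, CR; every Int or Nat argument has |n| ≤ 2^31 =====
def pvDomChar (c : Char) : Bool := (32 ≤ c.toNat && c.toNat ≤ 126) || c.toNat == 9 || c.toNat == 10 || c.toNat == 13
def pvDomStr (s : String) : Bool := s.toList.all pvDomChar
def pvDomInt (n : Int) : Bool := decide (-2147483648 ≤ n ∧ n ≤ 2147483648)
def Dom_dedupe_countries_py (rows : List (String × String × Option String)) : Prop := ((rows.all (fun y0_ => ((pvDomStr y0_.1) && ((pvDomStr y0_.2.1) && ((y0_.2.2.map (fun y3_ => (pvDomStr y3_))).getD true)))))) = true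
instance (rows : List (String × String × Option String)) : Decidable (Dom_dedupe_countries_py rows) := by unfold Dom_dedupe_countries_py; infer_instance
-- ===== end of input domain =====

-- B groups rows by norm into per-key lists first, then selects each group's representative
-- in a separate pass, instead of A's inline upgrade of the stored tuple (same cost, different decomposition).


-- truthiness of the iso3 field (None and '' are falsy)
def pvTruthy (o : Option String) : Bool :=
  match o with
  | none => false
  | some s => decide (s ≠ "")

-- ===== PORT A =====
def dedupe_countries_py (rows : List (String × String × Option String)) : List (String × String × Option String) :=
  (rows.foldl
    (fun (unique : PySem.Dict String (String × String × Option String)) r =>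
      if r.2.1 = "" then unique
      else
        match unique.get? r.2.1 with
        | none => unique.insert r.2.1 (r.1, r.2.1, r.2.2)
        | some v =>
          if v.2.2 = none ∧ pvTruthy r.2.2 = true then unique.insert r.2.1 (r.1, r.2.1, r.2.2)
          else unique)
    PySem.Dict.empty).values

-- ===== PORT B =====
-- selection loop of B: grp[0], upgraded (with break) only when its iso3 is None
def pvChoose (grp : List (String × String × Option String)) : String × String × Option String :=
  match grp with
  | [] => ("", "", none)  -- unreachable: every stored group is nonempty
  | c :: rest =>
    if c.2.2 = none then
      match rest.find? (fun cand => pvTruthy cand.2.2) with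
      | some cand => cand
      | none => c
    else c

def dedupe_countries_py_alt (rows : List (String × String × Option String)) : List (String × String × Option String) :=
  let groups := rows.foldl
    (fun (g : PySem.Dict String (List (String × String × Option String))) row =>
      if row.2.1 = "" then g
      else g.modify row.2.1 [] (· ++ [row]))
    PySem.Dict.empty
  groups.values.foldl (fun acc grp => acc ++ [pvChoose grp]) []

-- ===== PRECONDITION & SPEC =====
def Spec_dedupe_countries_py (rows : List (String × String × Option String)) (out : List (String × String × Option String)) : Prop := out = dedupe_countries_py_alt rows
instance (rows : List (String × String × Option String)) (out : List (String × String × Option String)) : Decidable (Spec_dedupe_countries_py rows out) := by unfold Spec_dedupe_countries_py; infer_instance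

-- ===== CLAIM (what is proved, stated in full; the proofs are below) =====
def Claim_equal_dedupe_countries_py : Prop := ∀ (rows : List (String × String × Option String)), Dom_dedupe_countries_py rows → Spec_dedupe_countries_py rows (dedupe_countries_py rows)

-- ===== LEMMAS AND PROOFS =====

theorem pvTruthy_ne_none {o : Option String} (h : pvTruthy o = true) : o ≠ none := by
  cases o <;> simp [pvTruthy] at h ⊢

theorem pvChoose_single (r : String × String × Option String) : pvChoose [r] = r := by
  simp [pvChoose]

-- A's inline-upgrade step computes pvChoose of the extended group
theorem pvChoose_append (grp : List (String × String × Option String)) (hg : grp ≠ [])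
    (r : String × String × Option String) :
    pvChoose (grp ++ [r]) =
      if (pvChoose grp).2.2 = none ∧ pvTruthy r.2.2 = true then r else pvChoose grp := by
  obtain ⟨c, rest, rfl⟩ := List.exists_cons_of_ne_nil hg
  by_cases hc : c.2.2 = none
  · simp only [List.cons_append, pvChoose, hc, List.find?_append]
    cases hf : rest.find? (fun cand => pvTruthy cand.2.2) with
    | some w =>
      have hw : pvTruthy w.2.2 = true := List.find?_some (p := fun cand : String × String × Option String => pvTruthy cand.2.2) hf
      simp [pvTruthy_ne_none hw]
    | none =>
      by_cases hr : pvTruthy r.2.2 = true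
      · simp [List.find?, hr, hc]
      · simp [List.find?, hr, hc]
  · simp [pvChoose, hc]

-- lookup in a value-mapped association list
theorem get?_mk_map {α β : Type} (l : List (String × α)) (f : α → β) (k : String) :
    (PySem.Dict.mk (l.map (fun p => (p.1, f p.2)))).get? k
      = ((PySem.Dict.mk l).get? k).map f := by
  induction l with
  | nil => rfl
  | cons p t ih =>
    obtain ⟨k1, v1⟩ := p
    simp only [List.map_cons, PySem.Dict.get?_mk_cons]
    by_cases hk : k1 == k
    · simp [hk]
    · simp only [hk, Bool.false_eq_true, ite_false, ih]

theorem get?_of_items_map {α β : Type} {u : PySem.Dict String β} {g : PySem.Dict String α}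
    (f : α → β) (h : u.items = g.items.map (fun p => (p.1, f p.2))) (k : String) :
    u.get? k = (g.get? k).map f := by
  cases u with | mk lu => cases g with | mk lg =>
  have : lu = lg.map (fun p => (p.1, f p.2)) := h
  subst this
  exact get?_mk_map lg f k

-- the loop invariant: A's dict is B's group dict with pvChoose applied to every value
theorem fold_items (rows : List (String × String × Option String))
    (u : PySem.Dict String (String × String × Option String))
    (g : PySem.Dict String (List (String × String × Option String)))
    (hnd : g.keys.Nodup)
    (h : u.items = g.items.map (fun p => (p.1, pvChoose p.2)))
    (hne : ∀ p ∈ g.items, p.2 ≠ []) :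
    (rows.foldl
      (fun unique r =>
        if r.2.1 = "" then unique
        else
          match unique.get? r.2.1 with
          | none => unique.insert r.2.1 (r.1, r.2.1, r.2.2)
          | some v =>
            if v.2.2 = none ∧ pvTruthy r.2.2 = true then unique.insert r.2.1 (r.1, r.2.1, r.2.2)
            else unique) u).items
    = ((rows.foldl
        (fun g row => if row.2.1 = "" then g else g.modify row.2.1 [] (· ++ [row])) g).items).map
        (fun p => (p.1, pvChoose p.2)) := by
  induction rows generalizing u g with
  | nil => simpa using h
  | cons r t ih =>
    simp only [List.foldl_cons]
    by_cases h0 : r.2.1 = ""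
    · simp only [h0, if_pos trivial]
      exact ih u g hnd h hne
    · simp only [h0, if_neg, not_false_iff]
      have hget := get?_of_items_map (fun grp => pvChoose grp) h r.2.1
      cases hg : g.get? r.2.1 with
      | none =>
        have hcg : g.contains r.2.1 = false := by
          rw [PySem.Dict.contains_eq_isSome_get?, hg]; rfl
        have hcu : u.contains r.2.1 = false := by
          rw [PySem.Dict.contains_eq_isSome_get?]
          rw [hg] at hget; rw [hget]; rfl
        rw [hget, hg]
        simp only [Option.map_none]
        have hmod : g.modify r.2.1 [] (· ++ [r]) = g.insert r.2.1 (g.getD r.2.1 [] ++ [r]) := rfl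
        rw [hmod, PySem.Dict.getD_of_get?_eq_none g [] hg, List.nil_append]
        apply ih
        · rw [PySem.Dict.keys_insert_of_not_contains g _ hcg]
          simp [List.nodup_append, hnd]
          intro a ha hak
          have : g.contains r.2.1 = true := by
            rw [PySem.Dict.contains_iff_mem_keys]; rw [← hak]; exact ha
          rw [hcg] at this; exact absurd this (by simp)
        · rw [PySem.Dict.items_insert_of_not_contains g _ hcg,
              PySem.Dict.items_insert_of_not_contains u _ hcu, h]
          simp [pvChoose_single]
        · intro p hp
          rw [PySem.Dict.items_insert_of_not_contains g _ hcg] at hp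
          rcases List.mem_append.mp hp with hp | hp
          · exact hne p hp
          · simp at hp; subst hp; simp
      | some grp =>
        have hcg : g.contains r.2.1 = true := by
          rw [PySem.Dict.contains_eq_isSome_get?, hg]; rfl
        have hmemg : (r.2.1, grp) ∈ g.items := PySem.Dict.mem_items_of_get?_eq_some g hg
        have hgrpne : grp ≠ [] := hne _ hmemg
        rw [hget, hg]
        simp only [Option.map_some]
        have hmod : g.modify r.2.1 [] (· ++ [r]) = g.insert r.2.1 (g.getD r.2.1 [] ++ [r]) := rfl
        have hgd : g.getD r.2.1 [] = grp := PySem.Dict.getD_of_get?_eq_some g [] hg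
        rw [hmod, hgd]
        have hchoose := pvChoose_append grp hgrpne r
        -- items of the updated group dict
        have hitemsg := PySem.Dict.items_insert_of_contains g (grp ++ [r]) hcg
        -- pointwise: mapping pvChoose over the replaced items equals A's updated items
        have hkey : ∀ p ∈ g.items, p.1 = r.2.1 → p = (r.2.1, grp) := by
          intro p hp hpk
          have hnd' : g.keys.Nodup := hnd
          obtain ⟨p1, p2⟩ := p
          simp only at hpk
          have := PySem.Dict.get?_of_mem_items (d := g) (k := p1) (v := p2) hp hnd'
          subst hpk
          rw [hg] at this
          simp at this
          simp [this]
        by_cases hcond : (pvChoose grp).2.2 = none ∧ pvTruthy r.2.2 = true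
        · -- A upgrades; B's group gains r, whose pvChoose is r
          simp only [hcond, and_self, if_pos]
          have hcu : u.contains r.2.1 = true := by
            rw [PySem.Dict.contains_eq_isSome_get?, hget, hg]; rfl
          apply ih
          · rwa [PySem.Dict.keys_insert_of_contains g _ hcg]
          · rw [PySem.Dict.items_insert_of_contains u _ hcu, hitemsg, h]
            simp only [List.map_map]
            apply List.map_congr_left
            intro p hp
            by_cases hpk : p.1 == r.2.1
            · have hpe : p = (r.2.1, grp) := hkey p hp (by simpa using hpk)
              subst hpe
              simp only [Function.comp, hpk, if_pos]
              simp [hchoose, hcond]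
            · simp [Function.comp, hpk]
          · intro p hp
            rw [hitemsg] at hp
            obtain ⟨q, hq, hqe⟩ := List.mem_map.mp hp
            by_cases hqk : q.1 == r.2.1
            · rw [if_pos hqk] at hqe; subst hqe; simp
            · rw [if_neg (by simpa using hqk)] at hqe; subst hqe; exact hne q hq
        · -- A keeps its value; pvChoose of the extended group is unchanged
          simp only [hcond, if_neg, not_false_iff]
          apply ih
          · rwa [PySem.Dict.keys_insert_of_contains g _ hcg]
          · rw [hitemsg, h]
            simp only [List.map_map]
            apply List.map_congr_left
            intro p hp
            by_cases hpk : p.1 == r.2.1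
            · have hpe : p = (r.2.1, grp) := hkey p hp (by simpa using hpk)
              subst hpe
              simp only [Function.comp, hpk, if_pos]
              simp [hchoose, hcond]
            · simp [Function.comp, hpk]
          · intro p hp
            rw [hitemsg] at hp
            obtain ⟨q, hq, hqe⟩ := List.mem_map.mp hp
            by_cases hqk : q.1 == r.2.1
            · rw [if_pos hqk] at hqe; subst hqe; simp
            · rw [if_neg (by simpa using hqk)] at hqe; subst hqe; exact hne q hq

-- ===== VERDICT (by name: the statement is the Claim_ definition above) =====
theorem dedupe_countries_py_spec : Claim_equal_dedupe_countries_py := by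
  intro rows _
  unfold Spec_dedupe_countries_py dedupe_countries_py dedupe_countries_py_alt
  have h := fold_items rows PySem.Dict.empty PySem.Dict.empty (by simp) (by rfl) (by simp [PySem.Dict.empty])
  rw [PySem.List.foldl_append_singleton_eq_map]
  simp only [PySem.Dict.values, h, List.map_map]
  rfl
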